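-- pv_equiv track=rewrite | github.com/miller-ian/miller-fund | king_tester_helper.py | create_daily_slate
-- ===== SOURCE A (Python) =====
-- def create_daily_slate(all_dates_with_games):
--     prev = []
--     after = []
--     for date in all_dates_with_games:
--         if int(date) > 1000:
--             prev.append(date)
--         else:
--             after.append(date)
--
--     datesWithGames = sorted(prev) + sorted(after)
--     return datesWithGames
-- ===== SOURCE B (Python) =====
-- def create_daily_slate(all_dates_with_games):
--     s = sorted(all_dates_with_games)
--     return [d for d in s if int(d) > 1000] + [d for d in s if int(d) <= 1000]
-- ===== Notes on version B (the rewrite author's own statement) =====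
-- stated objective: alternative
-- what changed: Instead of partitioning first and sorting each group, B sorts the whole list once and then filters the sorted list into the '>1000' part followed by the '<=1000' part.
import Mathlib
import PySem

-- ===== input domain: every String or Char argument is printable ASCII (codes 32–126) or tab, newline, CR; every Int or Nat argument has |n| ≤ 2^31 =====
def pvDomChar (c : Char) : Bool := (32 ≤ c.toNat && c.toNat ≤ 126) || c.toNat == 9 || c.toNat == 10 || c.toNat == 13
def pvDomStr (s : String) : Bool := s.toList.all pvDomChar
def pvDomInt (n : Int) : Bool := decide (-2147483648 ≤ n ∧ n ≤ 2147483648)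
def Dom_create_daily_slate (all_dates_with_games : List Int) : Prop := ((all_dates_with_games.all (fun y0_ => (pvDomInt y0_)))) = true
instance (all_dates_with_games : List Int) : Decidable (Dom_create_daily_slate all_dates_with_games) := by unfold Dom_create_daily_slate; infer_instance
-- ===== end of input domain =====

-- B sorts the whole list once and then filters the sorted list into the '>1000' part
-- followed by the '<=1000' part, instead of A's partition-then-sort-each-then-concatenate
-- (objective: alternative decomposition, same asymptotic cost).

-- ===== PORT A =====
def create_daily_slate (all_dates_with_games : List Int) : List Int :=
  let pa := all_dates_with_games.foldl
    (fun (pa : List Int × List Int) date =>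
      if 1000 < date then (pa.1 ++ [date], pa.2) else (pa.1, pa.2 ++ [date]))
    ([], [])
  PySem.List.sorted pa.1 (fun x => x) false ++ PySem.List.sorted pa.2 (fun x => x) false

-- ===== PORT B =====
def create_daily_slate_alt (all_dates_with_games : List Int) : List Int :=
  let s := PySem.List.sorted all_dates_with_games (fun x => x) false
  s.filter (fun d => decide (1000 < d)) ++ s.filter (fun d => decide (d ≤ 1000))

-- ===== PRECONDITION & SPEC =====
def Spec_create_daily_slate (all_dates_with_games : List Int) (out : List Int) : Prop := out = create_daily_slate_alt all_dates_with_games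
instance (all_dates_with_games : List Int) (out : List Int) : Decidable (Spec_create_daily_slate all_dates_with_games out) := by unfold Spec_create_daily_slate; infer_instance

-- ===== CLAIM (what is proved, stated in full; the proofs are below) =====
def Claim_equal_create_daily_slate : Prop := ∀ (all_dates_with_games : List Int), Dom_create_daily_slate all_dates_with_games → Spec_create_daily_slate all_dates_with_games (create_daily_slate all_dates_with_games)

-- ===== LEMMAS AND PROOFS =====

-- A's loop is a two-way partition: it returns the two filters, appended to the accumulators.
theorem pv_foldl_partition (xs pr af : List Int) :
    xs.foldl
      (fun (pa : List Int × List Int) date =>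
        if 1000 < date then (pa.1 ++ [date], pa.2) else (pa.1, pa.2 ++ [date]))
      (pr, af)
    = (pr ++ xs.filter (fun d => decide (1000 < d)),
       af ++ xs.filter (fun d => decide (d ≤ 1000))) := by
  induction xs generalizing pr af with
  | nil => simp
  | cons x t ih =>
    by_cases hx : 1000 < x
    · simp [List.foldl_cons, hx, ih, not_lt.mpr, le_of_lt]
    · simp [List.foldl_cons, hx, ih, (by omega : x ≤ 1000)]

-- sorting then filtering = filtering then sorting (for any Bool predicate).
theorem pv_sorted_filter (xs : List Int) (p : Int → Bool) :
    PySem.List.sorted (xs.filter p) (fun x => x) false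
    = (PySem.List.sorted xs (fun x => x) false).filter p := by
  apply PySem.List.sorted_id_eq_of_perm_of_pairwise
  · exact (PySem.List.sorted_perm xs (fun x => x) false).filter p
  · exact (PySem.List.sorted_pairwise xs (fun x => x)).sublist List.filter_sublist

-- ===== VERDICT (by name: the statement is the Claim_ definition above) =====
theorem create_daily_slate_spec : Claim_equal_create_daily_slate := by
  intro xs _
  unfold Spec_create_daily_slate create_daily_slate create_daily_slate_alt
  simp only [pv_foldl_partition, List.nil_append]
  rw [pv_sorted_filter, pv_sorted_filter]
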